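-- pv_equiv track=rewrite | github.com/Lag1101/WakeUpMafia | Mafia/app_function.py | check_best_move
-- ===== SOURCE A (Python) =====
-- def check_best_move(black_team, best_move):
--     black_team_num = []
--     for x in black_team:
--         if x.isdigit():
--             black_team_num.append(int(x))
--     if len(black_team_num) > 3:
--         if black_team_num[2] == 1 and black_team_num[3] == 0:
--             black_team_num = [black_team_num[0], black_team_num[1], 10]
--         else:
--             black_team_num = [black_team_num[0], black_team_num[1], black_team_num[2]]
--
--     best_move_num = []
--     for x in best_move:
--         if x.isdigit():
--             best_move_num.append(int(x))
--     if len(best_move_num) > 3: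
--         if best_move_num[2] == 1 and best_move_num[3] == 0:
--             best_move_num = [best_move_num[0], best_move_num[1], 10]
--         else:
--             best_move_num = [best_move_num[0], best_move_num[1], best_move_num[2]]
--
--     targets = 0
--     for x in black_team_num:
--         for y in best_move_num:
--             if x == y:
--                 targets += 1
--
--     return targets
-- ===== SOURCE B (Python) =====
-- def check_best_move(black_team, best_move):
--     def parse(s):
--         nums = [int(c) for c in s if c.isdigit()]
--         if len(nums) > 3:
--             if nums[2] == 1 and nums[3] == 0:
--                 nums = [nums[0], nums[1], 10]
--             else:
--                 nums = [nums[0], nums[1], nums[2]]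
--         return nums
--
--     ca = {}
--     for v in parse(black_team):
--         ca[v] = ca.get(v, 0) + 1
--     cb = {}
--     for v in parse(best_move):
--         cb[v] = cb.get(v, 0) + 1
--     return sum(n * cb.get(v, 0) for v, n in ca.items())
-- ===== Notes on version B (the rewrite author's own statement) =====
-- stated objective: alternative
-- what changed: The nested cross-product loop over the two digit lists is replaced by building a frequency table (dict counter) for each list and summing count_a[v]*count_b[v] over the keys of the first table.
import Mathlib
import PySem

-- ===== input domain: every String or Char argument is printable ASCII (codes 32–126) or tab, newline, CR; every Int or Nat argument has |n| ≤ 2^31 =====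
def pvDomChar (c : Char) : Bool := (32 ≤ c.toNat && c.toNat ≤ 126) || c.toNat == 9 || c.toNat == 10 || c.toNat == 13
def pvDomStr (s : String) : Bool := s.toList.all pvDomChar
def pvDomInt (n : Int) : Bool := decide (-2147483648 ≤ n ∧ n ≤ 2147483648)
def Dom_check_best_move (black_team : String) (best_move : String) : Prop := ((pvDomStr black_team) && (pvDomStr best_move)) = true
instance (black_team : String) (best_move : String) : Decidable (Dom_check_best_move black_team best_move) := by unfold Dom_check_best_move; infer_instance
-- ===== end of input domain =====

-- B replaces A's nested cross-product counting loop with two dict frequency tables and a single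
-- sum of products over the first table's items; return value only, no side effects involved.

-- ===== PORT A =====
-- the 'for x in s: if x.isdigit(): append(int(x))' loop (Char.isDigit is Python's isdigit on the ASCII domain; int(x) of a digit char is code-48)
def cbmDigitsA (s : String) : List Int :=
  s.toList.foldl (fun acc x => if x.isDigit then acc ++ [((x.toNat : Int) - 48)] else acc) []

-- the 'if len(nums) > 3: …' truncation block; the 4-element pattern is the len > 3 test plus the nums[0..3] reads
def cbmCutA (nums : List Int) : List Int :=
  match nums with
  | a :: b :: c :: d :: _ => if c = 1 ∧ d = 0 then [a, b, 10] else [a, b, c]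
  | _ => nums

def check_best_move (black_team : String) (best_move : String) : Int :=
  let black_team_num := cbmCutA (cbmDigitsA black_team)
  let best_move_num := cbmCutA (cbmDigitsA best_move)
  black_team_num.foldl (fun t x => best_move_num.foldl (fun t y => if x == y then t + 1 else t) t) 0

-- ===== PORT B =====
-- Source B's parse(s): digit comprehension, then the same truncation block (pattern = len > 3 test + the indexed reads)
def cbmParseB (s : String) : List Int :=
  let nums := (s.toList.filter (fun c => c.isDigit)).map (fun c => ((c.toNat : Int) - 48))
  match nums with
  | a :: b :: c :: d :: _ => if c = 1 ∧ d = 0 then [a, b, 10] else [a, b, c]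
  | _ => nums

def check_best_move_alt (black_team : String) (best_move : String) : Int :=
  let ca := (cbmParseB black_team).foldl (fun d v => d.insert v (d.getD v 0 + 1)) (PySem.Dict.empty)
  let cb := (cbmParseB best_move).foldl (fun d v => d.insert v (d.getD v 0 + 1)) (PySem.Dict.empty)
  ca.items.foldl (fun s p => s + p.2 * cb.getD p.1 0) 0

-- ===== PRECONDITION & SPEC =====
def Spec_check_best_move (black_team : String) (best_move : String) (out : Int) : Prop := out = check_best_move_alt black_team best_move
instance (black_team : String) (best_move : String) (out : Int) : Decidable (Spec_check_best_move black_team best_move out) := by unfold Spec_check_best_move; infer_instance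

-- ===== CLAIM (what is proved, stated in full; the proofs are below) =====
def Claim_equal_check_best_move : Prop := ∀ (black_team : String) (best_move : String), Dom_check_best_move black_team best_move → Spec_check_best_move black_team best_move (check_best_move black_team best_move)

-- ===== LEMMAS AND PROOFS =====

-- the two parses agree
theorem cbmParse_eq (s : String) : cbmCutA (cbmDigitsA s) = cbmParseB s := by
  simp [cbmDigitsA, cbmParseB, cbmCutA, PySem.List.foldl_append_if]

-- sum of g over the unique element of a nodup list that equals x
theorem sum_ite_mem (l : List Int) (x : Int) (g : Int → Int)
    (hnd : l.Nodup) (hx : x ∈ l) :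
    (l.map (fun k => if k = x then g k else 0)).sum = g x := by
  induction l with
  | nil => cases hx
  | cons a t ih =>
    rw [List.nodup_cons] at hnd
    by_cases ha : a = x
    · subst ha
      have hz : t.map (fun k => if k = a then g k else 0) = t.map (fun _ => (0 : Int)) :=
        List.map_congr_left (fun k hk => by
          have hne : k ≠ a := fun he => hnd.1 (he ▸ hk)
          simp [hne])
      simp [hz]
    · have hxt : x ∈ t := by
        rcases List.mem_cons.mp hx with h | h
        · exact absurd h.symm ha
        · exact h
      simp [ha, ih hnd.2 hxt]

-- grouping a sum by value: Σ_{x∈t} f x = Σ_{k ∈ set(t)} count(k) * f k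
theorem sum_group (t : List Int) (f : Int → Int) :
    (t.map f).sum
      = ((PySem.Set.ofList t).map (fun k => (t.count k : Int) * f k)).sum := by
  induction t using List.reverseRecOn with
  | nil => simp [PySem.Set.ofList]
  | append_singleton t x ih =>
    have hset : PySem.Set.ofList (t ++ [x]) = PySem.Set.add (PySem.Set.ofList t) x := by
      simp [PySem.Set.ofList_eq_foldl, List.foldl_append]
    by_cases hx : x ∈ t
    · have hcont : PySem.Set.contains (PySem.Set.ofList t) x = true := by
        simp [PySem.Set.contains, PySem.Set.mem_ofList, hx]
      have hadd : PySem.Set.add (PySem.Set.ofList t) x = PySem.Set.ofList t := by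
        unfold PySem.Set.add; rw [hcont]; simp
      have hcnt : ∀ k, ((t ++ [x]).count k : Int) * f k
          = (t.count k : Int) * f k + (if k = x then f k else 0) := by
        intro k
        rw [List.count_append]
        by_cases hk : k = x
        · subst hk; simp; ring
        · have h0 : List.count k [x] = 0 :=
            List.count_eq_zero.mpr (by simp [hk])
          simp [h0, hk]
      calc ((t ++ [x]).map f).sum
          = (t.map f).sum + f x := by simp
        _ = ((PySem.Set.ofList t).map (fun k => (t.count k : Int) * f k)).sum + f x := by rw [ih]
        _ = ((PySem.Set.ofList t).map (fun k => ((t ++ [x]).count k : Int) * f k)).sum := by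
              rw [List.map_congr_left (fun k _ => hcnt k), PySem.List.sum_map_add_int,
                sum_ite_mem _ x f (PySem.Set.nodup_ofList t)
                  ((PySem.Set.mem_ofList t x).mpr hx)]
        _ = ((PySem.Set.ofList (t ++ [x])).map (fun k => ((t ++ [x]).count k : Int) * f k)).sum := by
              rw [hset, hadd]
    · have hcont : PySem.Set.contains (PySem.Set.ofList t) x = false := by
        simp [PySem.Set.contains, PySem.Set.mem_ofList, hx]
      have hadd : PySem.Set.add (PySem.Set.ofList t) x = PySem.Set.ofList t ++ [x] := by
        unfold PySem.Set.add; rw [hcont]; simp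
      have hcnt : ∀ k ∈ PySem.Set.ofList t,
          ((t ++ [x]).count k : Int) * f k = (t.count k : Int) * f k := by
        intro k hk
        have hkt : k ∈ t := (PySem.Set.mem_ofList t k).mp hk
        have hne : k ≠ x := fun he => hx (he ▸ hkt)
        have h0 : List.count k [x] = 0 := List.count_eq_zero.mpr (by simp [hne])
        rw [List.count_append, h0]; simp
      have hx0 : t.count x = 0 := List.count_eq_zero.mpr hx
      calc ((t ++ [x]).map f).sum
          = (t.map f).sum + f x := by simp
        _ = ((PySem.Set.ofList t).map (fun k => (t.count k : Int) * f k)).sum + f x := by rw [ih]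
        _ = ((PySem.Set.ofList t).map (fun k => ((t ++ [x]).count k : Int) * f k)).sum
              + ((t ++ [x]).count x : Int) * f x := by
              rw [List.map_congr_left hcnt, List.count_append, hx0, List.count_singleton]
              simp
        _ = ((PySem.Set.ofList (t ++ [x])).map (fun k => ((t ++ [x]).count k : Int) * f k)).sum := by
              rw [hset, hadd]; simp

-- the cross-product count equals the sum of products of frequencies
theorem count_sum_eq (xs ys : List Int) :
    xs.foldl (fun t x => ys.foldl (fun t y => if x == y then t + 1 else t) t) 0
      = (PySem.Dict.counter xs).items.foldl
          (fun s p => s + p.2 * (PySem.Dict.counter ys).getD p.1 0) 0 := by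
  have hinner : ∀ (t : Int) (x : Int), x ∈ xs →
      ys.foldl (fun t y => if x == y then t + 1 else t) t = t + (ys.count x : Int) := by
    intro t x _
    have hflip : (fun (t : Int) (y : Int) => if x == y then t + 1 else t)
        = fun t y => if y == x then t + 1 else t := by
      funext t y
      by_cases h : x = y
      · simp [h]
      · simp [h, Ne.symm h]
    rw [hflip, PySem.List.foldl_beq_add_one]
  rw [PySem.List.foldl_congr_mem _ _ _ _ hinner, PySem.List.foldl_add, PySem.List.foldl_add,
    PySem.Dict.items_counter, List.map_map]
  have hgetD : ∀ k ∈ PySem.Set.ofList xs,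
      ((fun p : Int × Int => p.2 * (PySem.Dict.counter ys).getD p.1 0) ∘
        fun k => (k, (xs.count k : Int))) k
        = (xs.count k : Int) * (ys.count k : Int) := by
    intro k _
    simp [Function.comp, PySem.Dict.getD_counter]
  rw [List.map_congr_left hgetD]
  simpa using sum_group xs (fun x => (ys.count x : Int))

-- ===== VERDICT (by name: the statement is the Claim_ definition above) =====
theorem check_best_move_spec : Claim_equal_check_best_move := by
  intro black_team best_move _
  show check_best_move black_team best_move = check_best_move_alt black_team best_move
  simp only [check_best_move, check_best_move_alt, ← cbmParse_eq,
    PySem.Dict.foldl_insert_getD_add_one_eq_counter]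
  exact count_sum_eq _ _
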